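-- pv_equiv track=rewrite | github.com/T9404/EGE | Python/ЕГЭ2021;2022/16/Задания из kompege/99.py | f
-- ===== SOURCE A (Python) =====
-- def f(x):
--     if x == 0:
--         return 1
--     elif x == 1:
--         return 3
--     elif x == 2:
--         return 2
--     else:
--         return f(x-1)*f(x-3)
-- ===== SOURCE B (Python) =====
-- def f(x):
--     # f(x) = 3**a(x) * 2**b(x), where the exponents follow the same additive
--     # recurrence e(x) = e(x-1) + e(x-3); computed iteratively in O(x) steps.
--     if x < 0:
--         raise ValueError("f is undefined for negative x")
--     if x == 0:
--         return 1
--     if x == 1: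
--         return 3
--     if x == 2:
--         return 2
--     a0, a1, a2 = 0, 1, 0
--     b0, b1, b2 = 0, 0, 1
--     for _ in range(x - 2):
--         a0, a1, a2 = a1, a2, a2 + a0
--         b0, b1, b2 = b1, b2, b2 + b0
--     return 3 ** a2 * 2 ** b2
-- ===== Notes on version B (the rewrite author's own statement) =====
-- stated objective: alternative
-- what changed: Replaces the double recursion f(x-1)*f(x-3) by an iterative loop that tracks the exponents of 3 and 2 (they obey the same recurrence additively) and returns 3**a * 2**b; fewer subproblem evaluations, though the giant result integers dominate the cost for both.
import Mathlib
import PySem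

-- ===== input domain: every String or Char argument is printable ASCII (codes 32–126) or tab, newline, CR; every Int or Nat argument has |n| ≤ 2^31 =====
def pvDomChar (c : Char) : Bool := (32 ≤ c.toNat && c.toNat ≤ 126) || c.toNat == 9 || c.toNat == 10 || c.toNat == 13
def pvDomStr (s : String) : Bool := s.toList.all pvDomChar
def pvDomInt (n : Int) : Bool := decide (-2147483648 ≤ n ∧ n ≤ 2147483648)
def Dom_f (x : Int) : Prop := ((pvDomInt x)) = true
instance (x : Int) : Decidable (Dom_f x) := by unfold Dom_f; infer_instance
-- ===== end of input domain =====

-- B replaces A's double recursion by a linear loop over the exponents of 3 and 2 in the result (alternative algorithm).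

-- ===== PORT A =====
-- A recurses as f(x-1)*f(x-3); on x < 0 the Python recursion never terminates
-- (RecursionError), which Pre_f excludes, so the port recurses on the Nat value.
def fNatA : Nat → Int
  | 0 => 1
  | 1 => 3
  | 2 => 2
  | n + 3 => fNatA (n + 2) * fNatA n

def f (x : Int) : Int := fNatA x.toNat

-- ===== PORT B =====
-- The exponents stay nonnegative throughout (sums starting from 0/1), so the
-- loop state is carried as Nats; the loop folds over range(x-2) exactly as Source B.
def fAltStep (st : Nat × Nat × Nat × Nat × Nat × Nat) (_ : Nat) : Nat × Nat × Nat × Nat × Nat × Nat :=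
  match st with
  | (a0, a1, a2, b0, b1, b2) => (a1, a2, a2 + a0, b1, b2, b2 + b0)

def f_alt (x : Int) : Int :=
  if x < 0 then 0  -- Python B raises ValueError here (outside Pre_f)
  else if x == 0 then 1
  else if x == 1 then 3
  else if x == 2 then 2
  else
    let s := (List.range (x - 2).toNat).foldl fAltStep (0, 1, 0, 0, 0, 1)
    (3 : Int) ^ s.2.2.1 * (2 : Int) ^ s.2.2.2.2.2

-- ===== PRECONDITION & SPEC =====
-- Pre_f excludes x < 0, on which Python A recurses forever (RecursionError).
def Pre_f (x : Int) : Prop := 0 ≤ x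
instance (x : Int) : Decidable (Pre_f x) := by unfold Pre_f; infer_instance
def pvWitness_f : Int := 5

def Spec_f (x : Int) (out : Int) : Prop := out = f_alt x
instance (x : Int) (out : Int) : Decidable (Spec_f x out) := by unfold Spec_f; infer_instance

-- ===== CLAIM (what is proved, stated in full; the proofs are below) =====
def Claim_equal_f : Prop := ∀ (x : Int), Dom_f x → Pre_f x → Spec_f x (f x)

-- ===== LEMMAS AND PROOFS =====

-- exponent sequences: A3 = exponent of 3, B2 = exponent of 2 in fNatA
def A3 : Nat → Nat
  | 0 => 0
  | 1 => 1
  | 2 => 0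
  | n + 3 => A3 (n + 2) + A3 n

def B2 : Nat → Nat
  | 0 => 0
  | 1 => 0
  | 2 => 1
  | n + 3 => B2 (n + 2) + B2 n

theorem fNatA_eq_pow : ∀ n : Nat, fNatA n = (3 : Int) ^ A3 n * (2 : Int) ^ B2 n := by
  intro n
  induction n using Nat.strong_induction_on with
  | _ n ih =>
    match n with
    | 0 => simp [fNatA, A3, B2]
    | 1 => simp [fNatA, A3, B2]
    | 2 => simp [fNatA, A3, B2]
    | m + 3 =>
      rw [fNatA, A3, B2, ih (m + 2) (by omega), ih m (by omega)]
      ring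

theorem foldl_range_state (k : Nat) :
    (List.range k).foldl fAltStep (0, 1, 0, 0, 0, 1)
      = (A3 k, A3 (k + 1), A3 (k + 2), B2 k, B2 (k + 1), B2 (k + 2)) := by
  induction k with
  | zero => simp [A3, B2]
  | succ k ih =>
    rw [List.range_succ, List.foldl_append, ih]
    simp only [List.foldl_cons, List.foldl_nil, fAltStep]
    have hA : A3 (k + 3) = A3 (k + 2) + A3 k := by rw [A3]
    have hB : B2 (k + 3) = B2 (k + 2) + B2 k := by rw [B2]
    simp [hA, hB]

theorem f_eq_alt_nat (n : Nat) : fNatA n = f_alt (n : Int) := by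
  match n with
  | 0 => decide
  | 1 => decide
  | 2 => decide
  | m + 3 =>
    unfold f_alt
    have h0 : ((m : Int) + 3 == 0) = false := by simp; omega
    have h1 : ((m : Int) + 3 == 1) = false := by simp; omega
    have h2 : ((m : Int) + 3 == 2) = false := by simp; omega
    push_cast
    rw [if_neg (by omega : ¬((m : Int) + 3 < 0)), h0, h1, h2]
    simp only [Bool.false_eq_true, if_false]
    have ht : ((m : Int) + 3 - 2).toNat = m + 1 := by omega
    rw [ht, foldl_range_state (m + 1)]
    simpa using fNatA_eq_pow (m + 3)

-- ===== VERDICT (by name: the statement is the Claim_ definition above) =====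
theorem f_spec : Claim_equal_f := by
  intro x _ hpre
  unfold Spec_f f
  have hx : ((x.toNat : Int)) = x := Int.toNat_of_nonneg hpre
  rw [← hx]
  exact f_eq_alt_nat x.toNat
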